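-- pv_equiv track=rewrite | github.com/Shibilsaleem/programs | absoluteDifference.py | absDifference
-- ===== SOURCE A (Python) =====
-- def absDifference(a):
--     difference=[]
--     for i in range(len(a)):
--         for j in range(i+1,len(a)):
--             difference.append(abs(a[i]-a[j]))
--     M,m=max(difference),min(difference)
--     res=5*M-m
--     return res
-- ===== SOURCE B (Python) =====
-- def absDifference(a):
--     s = sorted(a)
--     M = s[-1] - s[0]
--     m = min(s[k + 1] - s[k] for k in range(len(s) - 1))
--     return 5 * M - m
-- ===== Notes on version B (the rewrite author's own statement) =====
-- stated objective: faster
-- what changed: Instead of enumerating all O(n^2) pairwise absolute differences, B sorts once and uses max|a_i-a_j| = max-min and min|a_i-a_j| = smallest adjacent gap of the sorted list.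
import Mathlib
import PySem

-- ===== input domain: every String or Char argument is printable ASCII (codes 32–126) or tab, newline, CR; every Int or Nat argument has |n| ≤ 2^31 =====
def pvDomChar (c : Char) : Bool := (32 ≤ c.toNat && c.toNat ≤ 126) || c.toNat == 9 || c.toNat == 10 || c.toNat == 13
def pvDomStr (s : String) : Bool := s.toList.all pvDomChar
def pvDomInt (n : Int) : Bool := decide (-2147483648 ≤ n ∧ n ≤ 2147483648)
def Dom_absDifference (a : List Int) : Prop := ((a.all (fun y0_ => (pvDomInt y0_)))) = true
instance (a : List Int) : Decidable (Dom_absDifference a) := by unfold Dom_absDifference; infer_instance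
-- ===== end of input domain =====

-- B replaces A's O(n^2) pairwise-difference enumeration by a single sort: max |a_i-a_j| = max-min,
-- min |a_i-a_j| = smallest adjacent gap of the sorted list (objective: faster).

-- ===== PORT A =====
def absDifference (a : List Int) : Int :=
  let difference : List Int :=
    (PySem.List.pyRange 0 (PySem.List.len a) 1).foldl (fun acc i =>
      (PySem.List.pyRange (i + 1) (PySem.List.len a) 1).foldl (fun acc j =>
        acc ++ [|PySem.List.pyGetD a i 0 - PySem.List.pyGetD a j 0|]) acc) []
  match PySem.List.max? difference (fun x => x), PySem.List.min? difference (fun x => x) with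
  | some M, some m => 5 * M - m
  | _, _ => 0   -- unreachable under Pre_ (Python raises ValueError on an empty difference list)

-- ===== PORT B =====
def absDifference_alt (a : List Int) : Int :=
  let s := PySem.List.sorted a (fun x => x) false
  let M := PySem.List.pyGetD s (-1) 0 - PySem.List.pyGetD s 0 0
  let gaps := (PySem.List.pyRange 0 (PySem.List.len s - 1) 1).map
      (fun k => PySem.List.pyGetD s (k + 1) 0 - PySem.List.pyGetD s k 0)
  match PySem.List.min? gaps (fun x => x) with
  | some m => 5 * M - m
  | none => 0   -- unreachable under Pre_ (Python raises ValueError on an empty gap sequence)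

-- ===== PRECONDITION & SPEC =====
-- Pre_ excludes only lists of length < 2, on which Python A raises ValueError (max/min of an empty sequence).
def Pre_absDifference (a : List Int) : Prop := 2 ≤ a.length
instance (a : List Int) : Decidable (Pre_absDifference a) := by unfold Pre_absDifference; infer_instance
def pvWitness_absDifference : List Int := [3, 1, 7]

def Spec_absDifference (a : List Int) (out : Int) : Prop := out = absDifference_alt a
instance (a : List Int) (out : Int) : Decidable (Spec_absDifference a out) := by unfold Spec_absDifference; infer_instance

-- ===== CLAIM (what is proved, stated in full; the proofs are below) =====
def Claim_equal_absDifference : Prop := ∀ (a : List Int), Dom_absDifference a → Pre_absDifference a → Spec_absDifference a (absDifference a)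

-- ===== LEMMAS AND PROOFS =====

-- A's difference list, as a flatMap: all |a[i]-a[j]| for 0 ≤ i < j < len a.
def pd (l : List Int) : List Int :=
  (PySem.List.pyRange 0 (PySem.List.len l) 1).flatMap (fun i =>
    (PySem.List.pyRange (i + 1) (PySem.List.len l) 1).map (fun j =>
      |PySem.List.pyGetD l i 0 - PySem.List.pyGetD l j 0|))

theorem pd_eq_fold (a : List Int) :
    (PySem.List.pyRange 0 (PySem.List.len a) 1).foldl (fun acc i =>
      (PySem.List.pyRange (i + 1) (PySem.List.len a) 1).foldl (fun acc j =>
        acc ++ [|PySem.List.pyGetD a i 0 - PySem.List.pyGetD a j 0|]) acc) [] = pd a := by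
  unfold pd
  simp only [PySem.List.foldl_append_singleton_eq_map]
  rw [PySem.List.foldl_append_eq_flatMap]
  simp

theorem mem_pd {l : List Int} {x : Int} :
    x ∈ pd l ↔ ∃ i j : Nat, i < j ∧ j < l.length ∧ x = |l.getD i 0 - l.getD j 0| := by
  unfold pd
  simp only [List.mem_flatMap, List.mem_map, PySem.List.mem_pyRange_one]
  constructor
  · rintro ⟨i, ⟨hi0, hin⟩, j, ⟨hij, hjn⟩, rfl⟩
    simp only [PySem.List.len_eq] at hin hjn
    have hj : j.toNat < l.length := by omega
    have hi : i.toNat < l.length := by omega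
    refine ⟨i.toNat, j.toNat, by omega, hj, ?_⟩
    rw [PySem.List.pyGetD_eq_getElem l 0 hi0 (by omega),
        PySem.List.pyGetD_eq_getElem l 0 (by omega) (by omega),
        List.getD_eq_getElem l 0 hi, List.getD_eq_getElem l 0 hj]
  · rintro ⟨i, j, hij, hjn, rfl⟩
    have hi : i < l.length := by omega
    refine ⟨(i : Int), ⟨by omega, by simp; omega⟩, (j : Int), ⟨by omega, by simp; omega⟩, ?_⟩
    rw [PySem.List.pyGetD_eq_getElem l 0 (by omega) (by simp; omega),
        PySem.List.pyGetD_eq_getElem l 0 (by omega) (by simp; omega),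
        List.getD_eq_getElem l 0 hi, List.getD_eq_getElem l 0 hjn]
    simp

-- Perm-invariant characterisation: x is a pairwise difference iff x = |u-v| for a 2-element subperm.
theorem mem_pd_subperm {l : List Int} {x : Int} :
    x ∈ pd l ↔ ∃ u v : Int, [u, v].Subperm l ∧ x = |u - v| := by
  rw [mem_pd]
  constructor
  · rintro ⟨i, j, hij, hjn, rfl⟩
    have hi : i < l.length := by omega
    refine ⟨l.getD i 0, l.getD j 0, ?_, rfl⟩
    have hs : ([l[(⟨i, hi⟩ : Fin l.length)], l[(⟨j, hjn⟩ : Fin l.length)]] : List Int).Sublist l := by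
      have := List.map_getElem_sublist (l := l) (is := [⟨i, hi⟩, ⟨j, hjn⟩])
        (by simp [Fin.mk_lt_mk]; omega)
      simpa using this
    rw [List.getD_eq_getElem l 0 hi, List.getD_eq_getElem l 0 hjn]
    exact hs.subperm
  · rintro ⟨u, v, ⟨l', hp, hs⟩, rfl⟩
    have hlen : l'.length = 2 := by simpa using hp.length_eq
    match l', hlen with
    | [x, y], _ =>
      obtain ⟨is, his, hpw⟩ := List.sublist_eq_map_getElem hs
      have hislen : is.length = 2 := by
        have := congrArg List.length his; simpa using this.symm
      match is, hislen with
      | [i, j], _ =>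
        have hij : (i : Nat) < (j : Nat) := by
          simpa using (List.pairwise_cons.mp hpw).1 j (by simp)
        have hx : x = l[i] := by simpa using congrArg (fun t => t.getD 0 x) his
        have hy : y = l[j] := by simpa using congrArg (fun t => t.getD 1 x) his
        have hxy : |u - v| = |x - y| := by
          have hxm : x ∈ [u, v] := hp.mem_iff.mp (by simp)
          simp at hxm
          rcases hxm with rfl | rfl
          · rw [List.singleton_perm_singleton.mp hp.cons_inv]
          · have h2 : ([x, y] : List Int).Perm [x, u] := hp.trans (List.Perm.swap x u [])
            rw [List.singleton_perm_singleton.mp h2.cons_inv, abs_sub_comm]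
        refine ⟨i, j, hij, j.isLt, ?_⟩
        rw [hxy, hx, hy, List.getD_eq_getElem l 0 i.isLt, List.getD_eq_getElem l 0 j.isLt]
        simp [Fin.getElem_fin]

theorem mem_pd_perm {l l' : List Int} (h : l.Perm l') {x : Int} : x ∈ pd l ↔ x ∈ pd l' := by
  rw [mem_pd_subperm, mem_pd_subperm]
  constructor
  · rintro ⟨u, v, hsp, rfl⟩; exact ⟨u, v, hsp.trans h.subperm, rfl⟩
  · rintro ⟨u, v, hsp, rfl⟩; exact ⟨u, v, hsp.trans h.symm.subperm, rfl⟩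

-- B's sorted list and its adjacent-gap list.
def srt (a : List Int) : List Int := PySem.List.sorted a (fun x => x) false

def gapsL (s : List Int) : List Int :=
  (PySem.List.pyRange 0 (PySem.List.len s - 1) 1).map
    (fun k => PySem.List.pyGetD s (k + 1) 0 - PySem.List.pyGetD s k 0)

theorem pyGetD_neg_one (l : List Int) :
    PySem.List.pyGetD l (-1) 0 = l.getD (l.length - 1) 0 := by
  rw [PySem.List.pyGetD, PySem.List.pyGet?_neg_one, List.getLast?_eq_getElem?]
  simp [List.getD]

theorem srt_mono (a : List Int) {i j : Nat} (hij : i ≤ j) (hj : j < (srt a).length) :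
    (srt a).getD i 0 ≤ (srt a).getD j 0 := by
  unfold srt at *
  rcases Nat.lt_or_ge i j with h | h
  · have hp := PySem.List.sorted_pairwise a (fun x => x)
    rw [List.pairwise_iff_getElem] at hp
    have := hp i j (by omega) hj h
    rwa [List.getD_eq_getElem _ 0 (by omega), List.getD_eq_getElem _ 0 hj]
  · have : i = j := by omega
    subst this; rfl

theorem abs_srt_getD {a : List Int} {i j : Nat} (hij : i ≤ j) (hj : j < (srt a).length) :
    |(srt a).getD i 0 - (srt a).getD j 0| = (srt a).getD j 0 - (srt a).getD i 0 := by
  have := srt_mono a hij hj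
  rw [abs_sub_comm, abs_of_nonneg (by omega)]

theorem mem_gapsL {s : List Int} {x : Int} :
    x ∈ gapsL s ↔ ∃ k : Nat, k + 1 < s.length ∧ x = s.getD (k + 1) 0 - s.getD k 0 := by
  unfold gapsL
  simp only [List.mem_map, PySem.List.mem_pyRange_one, PySem.List.len_eq]
  constructor
  · rintro ⟨k, ⟨hk0, hkn⟩, rfl⟩
    refine ⟨k.toNat, by omega, ?_⟩
    rw [PySem.List.pyGetD_eq_getElem s 0 (by omega) (by omega),
        PySem.List.pyGetD_eq_getElem s 0 hk0 (by omega),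
        List.getD_eq_getElem s 0 (by omega), List.getD_eq_getElem s 0 (by omega)]
    congr 2 <;> omega
  · rintro ⟨k, hk, rfl⟩
    refine ⟨(k : Int), ⟨by omega, by omega⟩, ?_⟩
    rw [PySem.List.pyGetD_eq_getElem s 0 (by omega) (by push_cast; omega),
        PySem.List.pyGetD_eq_getElem s 0 (by omega) (by push_cast; omega),
        List.getD_eq_getElem s 0 (by omega), List.getD_eq_getElem s 0 (by omega)]
    congr 2 <;> omega

theorem main_eq (a : List Int) (h2 : 2 ≤ a.length) : absDifference a = absDifference_alt a := by
  have hperm : (srt a).Perm a := PySem.List.sorted_perm a (fun x => x) false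
  have hlen : (srt a).length = a.length := hperm.length_eq
  -- nonemptiness of the two extremal lists
  have hpd_ne : pd a ≠ [] := by
    intro hnil
    have hm : |a.getD 0 0 - a.getD 1 0| ∈ pd a :=
      mem_pd.mpr ⟨0, 1, by omega, by omega, rfl⟩
    rw [hnil] at hm; simp at hm
  have hgaps_ne : gapsL (srt a) ≠ [] := by
    intro hnil
    have hm : (srt a).getD 1 0 - (srt a).getD 0 0 ∈ gapsL (srt a) :=
      mem_gapsL.mpr ⟨0, by omega, rfl⟩
    rw [hnil] at hm; simp at hm
  obtain ⟨M, hM⟩ : ∃ M, PySem.List.max? (pd a) (fun x => x) = some M := by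
    cases hMx : PySem.List.max? (pd a) (fun x => x) with
    | none => exact absurd ((PySem.List.max?_eq_none_iff _ _).mp hMx) hpd_ne
    | some M => exact ⟨M, rfl⟩
  obtain ⟨m, hm⟩ : ∃ m, PySem.List.min? (pd a) (fun x => x) = some m := by
    cases hmx : PySem.List.min? (pd a) (fun x => x) with
    | none => exact absurd ((PySem.List.min?_eq_none_iff _ _).mp hmx) hpd_ne
    | some m => exact ⟨m, rfl⟩
  obtain ⟨g, hg⟩ : ∃ g, PySem.List.min? (gapsL (srt a)) (fun x => x) = some g := by
    cases hgx : PySem.List.min? (gapsL (srt a)) (fun x => x) with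
    | none => exact absurd ((PySem.List.min?_eq_none_iff _ _).mp hgx) hgaps_ne
    | some g => exact ⟨g, rfl⟩
  -- every pairwise difference is bounded by last - first
  have hub : ∀ x ∈ pd a, x ≤ (srt a).getD (a.length - 1) 0 - (srt a).getD 0 0 := by
    intro x hx
    obtain ⟨i, j, hij, hjn, rfl⟩ := mem_pd.mp ((mem_pd_perm hperm).mpr hx)
    rw [abs_srt_getD (by omega) hjn]
    have h1 := srt_mono a (Nat.zero_le i) (show i < (srt a).length by omega)
    have h2 := srt_mono a (show j ≤ a.length - 1 by omega) (by omega)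
    omega
  -- last - first is itself a pairwise difference
  have hmaxmem : (srt a).getD (a.length - 1) 0 - (srt a).getD 0 0 ∈ pd a := by
    refine (mem_pd_perm hperm).mp (mem_pd.mpr ⟨0, a.length - 1, by omega, by omega, ?_⟩)
    rw [abs_srt_getD (by omega) (by omega)]
  -- every adjacent gap is a pairwise difference
  have hgapsub : ∀ x ∈ gapsL (srt a), x ∈ pd a := by
    intro x hx
    obtain ⟨k, hk, rfl⟩ := mem_gapsL.mp hx
    refine (mem_pd_perm hperm).mp (mem_pd.mpr ⟨k, k + 1, by omega, hk, ?_⟩)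
    rw [abs_srt_getD (by omega) hk]
  -- the min gap bounds every pairwise difference from below
  have hlb : ∀ x ∈ pd a, g ≤ x := by
    intro x hx
    obtain ⟨i, j, hij, hjn, rfl⟩ := mem_pd.mp ((mem_pd_perm hperm).mpr hx)
    rw [abs_srt_getD (by omega) hjn]
    have hgapj : (srt a).getD (j - 1 + 1) 0 - (srt a).getD (j - 1) 0 ∈ gapsL (srt a) :=
      mem_gapsL.mpr ⟨j - 1, by omega, rfl⟩
    have h1 := PySem.List.min?_isMin hg _ hgapj
    have h2 := srt_mono a (show i ≤ j - 1 by omega) (by omega)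
    have h3 : j - 1 + 1 = j := by omega
    rw [h3] at h1
    omega
  -- identify M and m
  have hMval : M = (srt a).getD (a.length - 1) 0 - (srt a).getD 0 0 := by
    have h1 := PySem.List.max?_isMax hM _ hmaxmem
    have h2 := hub M (PySem.List.max?_mem hM)
    omega
  have hmval : m = g := by
    have h1 := PySem.List.min?_isMin hm _ (hgapsub _ (PySem.List.min?_mem hg))
    have h2 := hlb m (PySem.List.min?_mem hm)
    omega
  -- assemble both sides
  have hA : absDifference a = 5 * M - m := by
    unfold absDifference
    rw [pd_eq_fold]
    simp only [hM, hm]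
  have hB : absDifference_alt a =
      5 * (PySem.List.pyGetD (srt a) (-1) 0 - PySem.List.pyGetD (srt a) 0 0) - g := by
    show (match PySem.List.min? (gapsL (srt a)) (fun x => x) with
      | some m => 5 * (PySem.List.pyGetD (srt a) (-1) 0 - PySem.List.pyGetD (srt a) 0 0) - m
      | none => 0) = _
    rw [hg]
  have e1 : PySem.List.pyGetD (srt a) (-1) 0 = (srt a).getD (a.length - 1) 0 := by
    rw [pyGetD_neg_one, hlen]
  have e2 : PySem.List.pyGetD (srt a) 0 0 = (srt a).getD 0 0 := by
    rw [PySem.List.pyGetD_eq_getElem (srt a) 0 le_rfl (by omega),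
        List.getD_eq_getElem _ 0 (by omega)]
    norm_num
  rw [hA, hB, hMval, hmval, e1, e2]

-- ===== VERDICT (by name: the statement is the Claim_ definition above) =====
theorem absDifference_spec : Claim_equal_absDifference := by
  intro a _ hpre
  exact main_eq a hpre
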